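-- pv_equiv track=rewrite | github.com/laurent-croq/advent-of-code | 2017/16.py | perform_dance
-- ===== SOURCE A (Python) =====
-- def perform_dance(programs, moves, count=1):
--     programs = [ c for c in programs ]
--     for _ in range(count):
--         for move in moves:
--             if move[0] == "s":
--                 programs = programs[-int(move[1][0]):] + programs[:-int(move[1][0])]
--             elif move[0] == "x":
--                 programs[int(move[1][0])], programs[int(move[1][1])] = programs[int(move[1][1])], programs[int(move[1][0])]
--             elif move[0] == "p":
--                 i1, i2 = programs.index(move[1][0]), programs.index(move[1][1])
--                 p1, p2 = programs[i1], programs[i2]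
--                 programs[i1] = p2
--                 programs[i2] = p1
--     return("".join(programs))
-- ===== SOURCE B (Python) =====
-- def perform_dance(programs, moves, count=1):
--     def one_round(state):
--         ps = [c for c in state]
--         for kind, args in moves:
--             if kind == "s":
--                 n = int(args[0])
--                 ps = ps[-n:] + ps[:-n]
--             elif kind == "x":
--                 i, j = int(args[0]), int(args[1])
--                 ps[i], ps[j] = ps[j], ps[i]
--             elif kind == "p":
--                 i, j = ps.index(args[0]), ps.index(args[1])
--                 ps[i], ps[j] = ps[j], ps[i]
--         return "".join(ps)
--
--     total = count if count > 0 else 0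
--     seen = [programs]
--     state = programs
--     steps = 0
--     while steps < total:
--         state = one_round(state)
--         steps += 1
--         if state == programs:
--             # the dance is periodic from the start: jump to count mod period
--             return seen[total % steps]
--         seen.append(state)
--     return state
-- ===== Notes on version B (the rewrite author's own statement) =====
-- stated objective: faster
-- what changed: A replays the whole move list count times; B simulates one round at a time, records the sequence of orders, and as soon as the order returns to the initial string it answers seen[count % period], so at most min(count, period) rounds are simulated.
import Mathlib
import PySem

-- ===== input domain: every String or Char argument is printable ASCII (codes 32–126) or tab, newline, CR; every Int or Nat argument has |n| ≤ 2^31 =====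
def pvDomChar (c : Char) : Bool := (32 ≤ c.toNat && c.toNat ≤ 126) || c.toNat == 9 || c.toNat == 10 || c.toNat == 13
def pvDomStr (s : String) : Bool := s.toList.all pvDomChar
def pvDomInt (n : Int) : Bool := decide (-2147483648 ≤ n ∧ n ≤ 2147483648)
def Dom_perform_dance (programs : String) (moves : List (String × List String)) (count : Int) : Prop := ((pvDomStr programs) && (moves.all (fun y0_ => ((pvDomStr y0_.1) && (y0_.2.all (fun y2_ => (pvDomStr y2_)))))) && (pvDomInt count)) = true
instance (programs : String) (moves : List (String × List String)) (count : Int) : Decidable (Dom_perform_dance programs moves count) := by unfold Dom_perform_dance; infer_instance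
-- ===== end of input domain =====

-- B replaces A's count × moves simulation by cycle detection: it simulates single
-- rounds, and as soon as the order returns to the start it answers seen[count % period].

-- ===== PORT A =====
-- one dance move applied to the list of one-character strings; `none` exactly where Python raises
def pvMoveA (ps : List String) (move : String × List String) : Option (List String) :=
  if move.1 == "s" then
    (PySem.List.pyGet? move.2 0).bind fun a0 =>
    (PySem.Int.ofStr? a0).bind fun n =>
    some (PySem.List.slice ps (some (-n)) none ++ PySem.List.slice ps none (some (-n)))
  else if move.1 == "x" then
    -- programs[i], programs[j] = programs[j], programs[i]
    (PySem.List.pyGet? move.2 0).bind fun a0 =>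
    (PySem.List.pyGet? move.2 1).bind fun a1 =>
    (PySem.Int.ofStr? a0).bind fun i =>
    (PySem.Int.ofStr? a1).bind fun j =>
    (PySem.List.pyGet? ps j).bind fun pj =>
    (PySem.List.pyGet? ps i).bind fun pi =>
    (PySem.List.pySet? ps i pj).bind fun ps1 =>
    PySem.List.pySet? ps1 j pi
  else if move.1 == "p" then
    (PySem.List.pyGet? move.2 0).bind fun a0 =>
    (PySem.List.pyGet? move.2 1).bind fun a1 =>
    (PySem.List.index? ps a0).bind fun i1 =>
    (PySem.List.index? ps a1).bind fun i2 =>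
    ps[i1]?.bind fun p1 =>
    ps[i2]?.bind fun p2 =>
    some ((ps.set i1 p2).set i2 p1)
  else some ps

def perform_dance (programs : String) (moves : List (String × List String)) (count : Int) : String :=
  let init : Option (List String) := some (programs.toList.map (fun c => String.ofList [c]))
  let res := (PySem.List.pyRange 0 count).foldl
    (fun st _ => moves.foldl (fun acc move => acc.bind (fun ps => pvMoveA ps move)) st) init
  match res with
  | some ps => PySem.Str.join "" ps
  | none => ""  -- unreachable under Pre_perform_dance (Python raises there)

-- ===== PORT B =====
-- B-side: one dance move (same move semantics as the task prescribes), written monadically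
def pvMoveB (ps : List String) (move : String × List String) : Option (List String) :=
  if move.1 == "s" then do
    let a0 ← PySem.List.pyGet? move.2 0
    let n ← PySem.Int.ofStr? a0
    pure (PySem.List.slice ps (some (-n)) none ++ PySem.List.slice ps none (some (-n)))
  else if move.1 == "x" then do
    let a0 ← PySem.List.pyGet? move.2 0
    let a1 ← PySem.List.pyGet? move.2 1
    let i ← PySem.Int.ofStr? a0
    let j ← PySem.Int.ofStr? a1
    let pj ← PySem.List.pyGet? ps j
    let pi ← PySem.List.pyGet? ps i
    let ps1 ← PySem.List.pySet? ps i pj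
    PySem.List.pySet? ps1 j pi
  else if move.1 == "p" then do
    let a0 ← PySem.List.pyGet? move.2 0
    let a1 ← PySem.List.pyGet? move.2 1
    let i1 ← PySem.List.index? ps a0
    let i2 ← PySem.List.index? ps a1
    let p1 ← ps[i1]?
    let p2 ← ps[i2]?
    pure ((ps.set i1 p2).set i2 p1)
  else pure ps

-- B's `one_round`: split the current order, apply every move once, join back
def pvOneRound (moves : List (String × List String)) (state : String) : Option String :=
  (moves.foldl (fun acc move => acc.bind (fun ps => pvMoveB ps move))
      (some (state.toList.map (fun c => String.ofList [c])))).map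
    (fun ps => PySem.Str.join "" ps)

-- B's while loop; `rem` = total - steps, `seen.length` = steps + 1
def pvLoopB (moves : List (String × List String)) (programs : String) (total : Nat) :
    Nat → List String → String → Option String
  | 0, _, state => some state
  | rem + 1, seen, state =>
    match pvOneRound moves state with
    | none => none  -- Python B raises here (outside Pre_perform_dance)
    | some st' =>
      if st' == programs then
        PySem.List.pyGet? seen ((total % seen.length : Nat) : Int)
      else
        pvLoopB moves programs total rem (seen ++ [st']) st'

def perform_dance_alt (programs : String) (moves : List (String × List String)) (count : Int) : String :=
  let total := count.toNat  -- `count if count > 0 else 0`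
  match pvLoopB moves programs total total [programs] programs with
  | some s => s
  | none => ""  -- unreachable under Pre_perform_dance (Python raises there)

-- ===== PRECONDITION & SPEC =====
-- A move never raises iff it is valid against the initial string: A's moves only permute
-- the characters, so lengths and the character multiset are invariant across the dance.
def pvValidMove (programs : String) (move : String × List String) : Bool :=
  if move.1 == "s" then
    match move.2 with
    | a0 :: _ => (PySem.Int.ofStr? a0).isSome
    | [] => false
  else if move.1 == "x" then
    match move.2 with
    | a0 :: a1 :: _ =>
      match PySem.Int.ofStr? a0, PySem.Int.ofStr? a1 with
      | some i, some j =>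
        decide (PySem.Raise.InRange programs.toList.length i) &&
        decide (PySem.Raise.InRange programs.toList.length j)
      | _, _ => false
    | _ => false
  else if move.1 == "p" then
    match move.2 with
    | a0 :: a1 :: _ =>
      (programs.toList.map (fun c => String.ofList [c])).contains a0 &&
      (programs.toList.map (fun c => String.ofList [c])).contains a1
    | _ => false
  else true

-- Pre_ excludes exactly the inputs where Python A raises: count ≥ 1 together with a move whose
-- argument is missing/not an int (IndexError/ValueError), an x-index out of range, or a p-name absent.
def Pre_perform_dance (programs : String) (moves : List (String × List String)) (count : Int) : Prop :=
  count ≤ 0 ∨ ∀ move ∈ moves, pvValidMove programs move = true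
instance (programs : String) (moves : List (String × List String)) (count : Int) : Decidable (Pre_perform_dance programs moves count) := by unfold Pre_perform_dance; infer_instance

def pvWitness_perform_dance : String × (List (String × List String)) × Int :=
  ("abcde", [("s", ["3"]), ("x", ["0", "4"]), ("p", ["a", "b"])], 6)

def Spec_perform_dance (programs : String) (moves : List (String × List String)) (count : Int) (out : String) : Prop := out = perform_dance_alt programs moves count
instance (programs : String) (moves : List (String × List String)) (count : Int) (out : String) : Decidable (Spec_perform_dance programs moves count out) := by unfold Spec_perform_dance; infer_instance

-- ===== CLAIM (what is proved, stated in full; the proofs are below) =====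
def Claim_equal_perform_dance : Prop := ∀ (programs : String) (moves : List (String × List String)) (count : Int), Dom_perform_dance programs moves count → Pre_perform_dance programs moves count → Spec_perform_dance programs moves count (perform_dance programs moves count)

-- ===== LEMMAS AND PROOFS =====

-- A's round, abstracted: fold all moves over a list state
def pvRound (moves : List (String × List String)) (ps : List String) : Option (List String) :=
  moves.foldl (fun acc move => acc.bind (fun ps => pvMoveA ps move)) (some ps)

-- A's outer loop as structural iteration of rounds
def pvRounds (moves : List (String × List String)) : Nat → List String → Option (List String)
  | 0, ps => some ps
  | n + 1, ps => (pvRound moves ps).bind (pvRounds moves n)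

-- Kleisli iteration of B's string-level round
def pvIterK (f : String → Option String) : Nat → String → Option String
  | 0, s => some s
  | n + 1, s => (f s).bind (pvIterK f n)

-- every element is a one-character string
def pvOneChar (ps : List String) : Prop := ∀ x ∈ ps, ∃ c, x = String.ofList [c]

theorem pvMoveB_eq : pvMoveB = pvMoveA := by
  funext ps move
  rfl

theorem pvFoldl_ignore_iterate {σ : Type} (g : σ → σ) (l : List Int) (init : σ) :
    l.foldl (fun st _ => g st) init = g^[l.length] init := by
  induction l generalizing init with
  | nil => rfl
  | cons a t ih => simp [List.foldl_cons, ih, Function.iterate_succ_apply]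

theorem pvFold_none (moves : List (String × List String)) :
    moves.foldl (fun acc move => acc.bind (fun ps => pvMoveA ps move)) none = none := by
  induction moves with
  | nil => rfl
  | cons m t ih => simpa using ih

theorem pvIterG (moves : List (String × List String)) (n : Nat) (ps : List String) :
    (fun st => moves.foldl (fun acc move => acc.bind (fun ps => pvMoveA ps move)) st)^[n] (some ps)
      = pvRounds moves n ps := by
  induction n generalizing ps with
  | zero => rfl
  | succ n ih =>
    rw [Function.iterate_succ_apply]
    show (fun st => moves.foldl (fun acc move => acc.bind (fun ps => pvMoveA ps move)) st)^[n]
        (pvRound moves ps) = (pvRound moves ps).bind (pvRounds moves n)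
    cases hr : pvRound moves ps with
    | none =>
      have hnone : ∀ m, (fun st => moves.foldl (fun acc move => acc.bind (fun ps => pvMoveA ps move)) st)^[m] (none : Option (List String)) = none := by
        intro m
        induction m with
        | zero => rfl
        | succ m ihm => rw [Function.iterate_succ_apply]; simpa [pvFold_none] using ihm
      simpa using hnone n
    | some ps' => simpa using ih ps'

theorem pvMemSet {α : Type} {xs : List α} {i : Int} {v x : α} {l : List α}
    (h : PySem.List.pySet? xs i v = some l) : x ∈ l → x ∈ xs ∨ x = v := by
  unfold PySem.List.pySet? at h
  cases hk : PySem.List.pyIdx? xs.length i with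
  | none => rw [hk] at h; simp at h
  | some k =>
    rw [hk] at h; simp at h; subst h
    exact fun hx => List.mem_or_eq_of_mem_set hx

theorem pvMoveA_oneChar {ps ps' : List String} {m : String × List String}
    (hps : pvOneChar ps) (h : pvMoveA ps m = some ps') : pvOneChar ps' := by
  unfold pvMoveA at h
  split_ifs at h
  · -- "s"
    cases ha0 : PySem.List.pyGet? m.2 0 with
    | none => rw [ha0] at h; simp at h
    | some a0 =>
      rw [ha0] at h
      simp only [Option.bind_some] at h
      cases hn : PySem.Int.ofStr? a0 with
      | none => rw [hn] at h; simp at h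
      | some n =>
        rw [hn] at h
        simp only [Option.bind_some] at h
        injection h with h
        subst h
        intro x hx
        rcases List.mem_append.1 hx with hx' | hx' <;>
          exact hps x (PySem.List.mem_of_mem_slice _ _ _ hx')
  · -- "x"
    cases ha0 : PySem.List.pyGet? m.2 0 with
    | none => rw [ha0] at h; simp at h
    | some a0 =>
      rw [ha0] at h
      simp only [Option.bind_some] at h
      cases ha1 : PySem.List.pyGet? m.2 1 with
      | none => rw [ha1] at h; simp at h
      | some a1 =>
        rw [ha1] at h
        simp only [Option.bind_some] at h
        cases hi : PySem.Int.ofStr? a0 with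
        | none => rw [hi] at h; simp at h
        | some i =>
          rw [hi] at h
          simp only [Option.bind_some] at h
          cases hj : PySem.Int.ofStr? a1 with
          | none => rw [hj] at h; simp at h
          | some j =>
            rw [hj] at h
            simp only [Option.bind_some] at h
            cases hpj : PySem.List.pyGet? ps j with
            | none => rw [hpj] at h; simp at h
            | some pj =>
              rw [hpj] at h
              simp only [Option.bind_some] at h
              cases hpi : PySem.List.pyGet? ps i with
              | none => rw [hpi] at h; simp at h
              | some pi =>
                rw [hpi] at h
                simp only [Option.bind_some] at h
                cases hps1 : PySem.List.pySet? ps i pj with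
                | none => rw [hps1] at h; simp at h
                | some ps1 =>
                  rw [hps1] at h
                  simp only [Option.bind_some] at h
                  intro x hx
                  rcases pvMemSet h hx with hx' | rfl
                  · rcases pvMemSet hps1 hx' with hx'' | rfl
                    · exact hps x hx''
                    · exact hps _ (PySem.List.mem_of_pyGet?_eq_some _ hpj)
                  · exact hps _ (PySem.List.mem_of_pyGet?_eq_some _ hpi)
  · -- "p"
    cases ha0 : PySem.List.pyGet? m.2 0 with
    | none => rw [ha0] at h; simp at h
    | some a0 =>
      rw [ha0] at h
      simp only [Option.bind_some] at h
      cases ha1 : PySem.List.pyGet? m.2 1 with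
      | none => rw [ha1] at h; simp at h
      | some a1 =>
        rw [ha1] at h
        simp only [Option.bind_some] at h
        cases hi1 : PySem.List.index? ps a0 with
        | none => rw [hi1] at h; simp at h
        | some i1 =>
          rw [hi1] at h
          simp only [Option.bind_some] at h
          cases hi2 : PySem.List.index? ps a1 with
          | none => rw [hi2] at h; simp at h
          | some i2 =>
            rw [hi2] at h
            simp only [Option.bind_some] at h
            cases hp1 : ps[i1]? with
            | none => rw [hp1] at h; simp at h
            | some p1 =>
              rw [hp1] at h
              simp only [Option.bind_some] at h
              cases hp2 : ps[i2]? with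
              | none => rw [hp2] at h; simp at h
              | some p2 =>
                rw [hp2] at h
                simp only [Option.bind_some] at h
                injection h with h
                subst h
                intro x hx
                rcases List.mem_or_eq_of_mem_set hx with hx' | rfl
                · rcases List.mem_or_eq_of_mem_set hx' with hx'' | rfl
                  · exact hps x hx''
                  · exact hps _ (List.mem_of_getElem? hp2)
                · exact hps _ (List.mem_of_getElem? hp1)
  · -- other move kinds: no-op
    injection h with h
    subst h
    exact hps

theorem pvRound_oneChar {moves : List (String × List String)} {ps ps' : List String}
    (hps : pvOneChar ps) (h : pvRound moves ps = some ps') : pvOneChar ps' := by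
  unfold pvRound at h
  induction moves generalizing ps with
  | nil => injection h with h; subst h; exact hps
  | cons m t ih =>
    rw [List.foldl_cons] at h
    simp only [Option.bind_some] at h
    cases hm : pvMoveA ps m with
    | none =>
      rw [hm, pvFold_none] at h
      exact absurd h (by simp)
    | some q =>
      rw [hm] at h
      exact ih (pvMoveA_oneChar hps hm) h

theorem pvOneChar_exists {ps : List String} (h : pvOneChar ps) :
    ∃ cs : List Char, ps = cs.map (fun c => String.ofList [c]) := by
  induction ps with
  | nil => exact ⟨[], rfl⟩
  | cons x t ih =>
    obtain ⟨c, rfl⟩ := h x (by simp)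
    obtain ⟨cs, rfl⟩ := ih (fun y hy => h y (by simp [hy]))
    exact ⟨c :: cs, rfl⟩

theorem pvJoin_toList (cs : List Char) :
    (PySem.Str.join "" (cs.map (fun c => String.ofList [c]))).toList = cs := by
  rw [PySem.Str.toList_join]
  have h2 : (cs.map (fun c => String.ofList [c])).map String.toList = cs.map (fun c => [c]) := by
    simp
  simp only [h2]
  exact PySem.Chars.join_nil_singletons cs

theorem pvJoinSplit (s : String) :
    PySem.Str.join "" (s.toList.map (fun c => String.ofList [c])) = s := by
  have h := congrArg String.ofList (pvJoin_toList s.toList)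
  simp only [String.ofList_toList] at h
  exact h

theorem pvOneRound_join {moves : List (String × List String)} {ps : List String}
    (hps : pvOneChar ps) :
    pvOneRound moves (PySem.Str.join "" ps)
      = (pvRound moves ps).map (fun l => PySem.Str.join "" l) := by
  obtain ⟨cs, rfl⟩ := pvOneChar_exists hps
  unfold pvOneRound pvRound
  rw [pvMoveB_eq, pvJoin_toList]

theorem pvMainBridge (moves : List (String × List String)) (n : Nat) (ps : List String)
    (hps : pvOneChar ps) :
    pvIterK (pvOneRound moves) n (PySem.Str.join "" ps)
      = (pvRounds moves n ps).map (fun l => PySem.Str.join "" l) := by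
  induction n generalizing ps with
  | zero => rfl
  | succ n ih =>
    simp only [pvIterK, pvRounds]
    rw [pvOneRound_join hps]
    cases hr : pvRound moves ps with
    | none => simp
    | some ps' =>
      simp only [Option.map_some, Option.bind_some]
      exact ih ps' (pvRound_oneChar hps hr)

theorem pvIterK_add (f : String → Option String) (a b : Nat) (s : String) :
    pvIterK f (a + b) s = (pvIterK f a s).bind (pvIterK f b) := by
  induction a generalizing s with
  | zero => simp [pvIterK]
  | succ a ih =>
    have hab : a + 1 + b = (a + b) + 1 := by omega
    rw [hab]
    simp only [pvIterK]
    cases f s with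
    | none => rfl
    | some t => simpa using ih t

theorem pvIterK_mod (f : String → Option String) (s0 : String) (p : Nat) (hp : 0 < p)
    (hcyc : pvIterK f p s0 = some s0) : ∀ k, pvIterK f k s0 = pvIterK f (k % p) s0 := by
  intro k
  induction k using Nat.strong_induction_on with
  | _ k ih =>
    by_cases hk : k < p
    · rw [Nat.mod_eq_of_lt hk]
    · have hle : p ≤ k := Nat.le_of_not_lt hk
      have hksub : k = p + (k - p) := by omega
      rw [hksub, pvIterK_add, hcyc, Option.bind_some, ih (k - p) (by omega),
        Nat.add_mod_left]

theorem pvLoopB_eq (moves : List (String × List String)) (programs : String) (total : Nat) :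
    ∀ (rem : Nat) (seen : List String) (state : String),
      seen ≠ [] →
      (∀ i (h : i < seen.length), pvIterK (pvOneRound moves) i programs = some seen[i]) →
      pvIterK (pvOneRound moves) (seen.length - 1) programs = some state →
      total = (seen.length - 1) + rem →
      pvLoopB moves programs total rem seen state = pvIterK (pvOneRound moves) total programs := by
  intro rem
  induction rem with
  | zero =>
    intro seen state _ _ hstate htot
    rw [htot, Nat.add_zero]
    exact hstate.symm
  | succ rem ih =>
    intro seen state hne hseen hstate htot
    have hlen : 0 < seen.length := List.length_pos_iff.2 hne
    have hsucc : seen.length - 1 + 1 = seen.length := by omega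
    have hstep : pvIterK (pvOneRound moves) seen.length programs
        = (pvIterK (pvOneRound moves) 1) state := by
      rw [← hsucc, pvIterK_add, hstate, Option.bind_some]
    rw [pvLoopB]
    split
    · rename_i hr
      have hnone : pvIterK (pvOneRound moves) seen.length programs = none := by
        rw [hstep]; simp [pvIterK, hr]
      have htot' : total = seen.length + rem := by omega
      rw [htot', pvIterK_add, hnone]
      rfl
    · rename_i st' hr
      have hnext : pvIterK (pvOneRound moves) seen.length programs = some st' := by
        rw [hstep]; simp [pvIterK, hr]
      by_cases heq : (st' == programs) = true
      · rw [if_pos heq]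
        rw [eq_of_beq heq] at hnext
        have hmod := pvIterK_mod (pvOneRound moves) programs seen.length hlen hnext
        have hlt : total % seen.length < seen.length := Nat.mod_lt _ hlen
        rw [hmod total, hseen (total % seen.length) hlt,
          PySem.List.pyGet?_natCast, List.getElem?_eq_getElem hlt]
      · rw [if_neg heq]
        apply ih (seen ++ [st']) st' (by simp)
        · intro i hilt
          rw [List.length_append, List.length_cons, List.length_nil] at hilt
          by_cases hi : i < seen.length
          · rw [List.getElem_append_left hi]
            exact hseen i hi
          · have hieq : i = seen.length := by omega
            subst hieq
            rw [List.getElem_append_right (by omega)]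
            simpa using hnext
        · rw [List.length_append, List.length_cons, List.length_nil]
          have hs : seen.length + 1 - 1 = seen.length := by omega
          rw [hs]
          exact hnext
        · rw [List.length_append, List.length_cons, List.length_nil]
          omega

theorem pvOneChar_init (s : String) : pvOneChar (s.toList.map (fun c => String.ofList [c])) := by
  intro x hx
  rcases List.mem_map.1 hx with ⟨c, _, rfl⟩
  exact ⟨c, rfl⟩

theorem pvMain (programs : String) (moves : List (String × List String)) (count : Int) :
    perform_dance programs moves count = perform_dance_alt programs moves count := by
  simp only [perform_dance, perform_dance_alt]
  have hA : (PySem.List.pyRange 0 count).foldl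
      (fun st _ => moves.foldl (fun acc move => acc.bind (fun ps => pvMoveA ps move)) st)
      (some (programs.toList.map (fun c => String.ofList [c])))
      = pvRounds moves count.toNat (programs.toList.map (fun c => String.ofList [c])) := by
    rw [pvFoldl_ignore_iterate
      (g := fun st : Option (List String) =>
        moves.foldl (fun acc move => acc.bind (fun ps => pvMoveA ps move)) st),
      PySem.List.length_pyRange_one]
    simpa using pvIterG moves (count - 0).toNat (programs.toList.map (fun c => String.ofList [c]))
  have hB : pvLoopB moves programs count.toNat count.toNat [programs] programs
      = pvIterK (pvOneRound moves) count.toNat programs := by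
    apply pvLoopB_eq moves programs count.toNat count.toNat [programs] programs (by simp)
    · intro i hilt
      have h0 : i = 0 := by simpa using Nat.lt_one_iff.mp (by simpa using hilt)
      subst h0
      rfl
    · rfl
    · simp
  have hbridge : pvIterK (pvOneRound moves) count.toNat programs
      = (pvRounds moves count.toNat (programs.toList.map (fun c => String.ofList [c]))).map
          (fun l => PySem.Str.join "" l) := by
    have hmb := pvMainBridge moves count.toNat (programs.toList.map (fun c => String.ofList [c]))
      (pvOneChar_init programs)
    rwa [pvJoinSplit] at hmb
  rw [hA, hB, hbridge]
  cases pvRounds moves count.toNat (programs.toList.map (fun c => String.ofList [c])) with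
  | none => rfl
  | some ps => rfl

-- ===== VERDICT (by name: the statement is the Claim_ definition above) =====
theorem perform_dance_spec : Claim_equal_perform_dance := by
  intro programs moves count _ _
  unfold Spec_perform_dance
  exact pvMain programs moves count
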